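-- pv_equiv track=rewrite | github.com/hackers458/dreamhack | Reverse Engineering/level3/Honest/Honest.py | calculate
-- ===== SOURCE A (Python) =====
-- def calculate(param_1: int) -> int:
--     # param_1은 0~255 범위의 byte 값
--     param_1 &= 0xFF
--
--     # 첫 번째 단계
--     bVar1 = ((param_1 >> 6) | ((param_1 ^ 0x3c) * 0x04)) * 0x05 + 0x7d
--     bVar1 &= 0xFF
--
--     # 두 번째 단계
--     bVar1 = ((bVar1 * 0x20) | (bVar1 >> 3)) ^ 0xb2
--     bVar1 &= 0xFF
--
--     # 세 번째 단계
--     bVar1 = ((bVar1 >> 4) | (bVar1 << 4)) * 0x03 - 0x2f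
--     bVar1 &= 0xFF
--
--     # 네 번째 단계
--     local_e = ((bVar1 >> 7) | (bVar1 * 0x02)) ^ 0xd4
--     local_e &= 0xFF
--
--     local_d = 0
--     for local_c in range(8):
--         local_d = (local_e & 1) | (local_d * 2)
--         local_e >>= 1
--
--     return local_d & 0xFF
-- ===== SOURCE B (Python) =====
-- # Precomputed 256-entry substitution table for the byte scramble (pure O(1) lookup).
-- _TABLE = (
--     57, 178, 62, 181, 235, 97, 61, 55, 104, 99, 239, 228, 186, 48, 60, 54,
--     233, 50, 190, 53, 107, 225, 237, 231, 184, 179, 63, 100, 106, 176, 188, 182,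
--     105, 226, 110, 229, 187, 49, 109, 103, 56, 51, 191, 180, 234, 96, 108, 102,
--     185, 98, 238, 101, 59, 177, 189, 183, 232, 227, 111, 52, 58, 224, 236, 230,
--     149, 154, 145, 157, 199, 73, 147, 31, 196, 75, 192, 204, 150, 24, 146, 30,
--     69, 26, 17, 29, 71, 201, 67, 207, 20, 155, 16, 76, 22, 152, 18, 158,
--     197, 202, 193, 205, 151, 25, 195, 79, 148, 27, 144, 156, 198, 72, 194, 78,
--     21, 74, 65, 77, 23, 153, 19, 159, 68, 203, 64, 28, 70, 200, 66, 206,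
--     169, 35, 175, 37, 116, 120, 44, 39, 246, 122, 242, 124, 170, 161, 173, 126,
--     119, 163, 47, 165, 244, 248, 240, 255, 40, 162, 46, 252, 42, 33, 45, 166,
--     247, 123, 243, 125, 171, 32, 112, 127, 168, 34, 174, 36, 245, 249, 241, 38,
--     41, 251, 115, 253, 43, 160, 172, 167, 118, 250, 114, 164, 117, 121, 113, 254,
--     130, 12, 4, 8, 217, 14, 134, 10, 91, 209, 221, 215, 128, 143, 7, 84,
--     90, 140, 132, 136, 89, 210, 94, 213, 131, 13, 93, 87, 0, 15, 135, 11,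
--     218, 80, 92, 86, 129, 82, 222, 85, 3, 141, 133, 137, 216, 211, 95, 139,
--     2, 208, 220, 214, 1, 142, 6, 138, 219, 81, 5, 9, 88, 83, 223, 212,
-- )
--
--
-- def calculate(param_1: int) -> int:
--     return _TABLE[param_1 & 0xFF]
-- ===== Notes on version B (the rewrite author's own statement) =====
-- stated objective: alternative
-- what changed: The four arithmetic scrambling stages and the eight-iteration bit-reversal loop are replaced entirely by a single lookup in a precomputed 256-entry substitution table indexed by param_1 & 0xFF.
import Mathlib
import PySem

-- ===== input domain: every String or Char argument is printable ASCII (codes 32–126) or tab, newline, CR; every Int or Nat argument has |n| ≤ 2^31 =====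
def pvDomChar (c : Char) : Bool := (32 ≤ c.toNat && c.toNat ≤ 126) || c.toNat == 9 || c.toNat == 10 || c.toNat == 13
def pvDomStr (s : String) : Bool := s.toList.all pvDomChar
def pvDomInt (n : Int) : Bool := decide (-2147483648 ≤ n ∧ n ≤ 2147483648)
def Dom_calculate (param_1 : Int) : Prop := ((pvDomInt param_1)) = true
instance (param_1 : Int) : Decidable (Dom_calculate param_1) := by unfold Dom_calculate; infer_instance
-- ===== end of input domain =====

-- B replaces A's four arithmetic scrambling stages and the bit-reversal loop with a single
-- precomputed 256-entry substitution-table lookup (alternative structure, constant-time lookup).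

-- ===== PORT A =====
def calculate (param_1 : Int) : Int :=
  let p := PySem.Int.band param_1 0xFF
  let b1 := PySem.Int.band ((PySem.Int.bor (p >>> 6) ((PySem.Int.bxor p 0x3c) * 0x04)) * 0x05 + 0x7d) 0xFF
  let b2 := PySem.Int.band (PySem.Int.bxor (PySem.Int.bor (b1 * 0x20) (b1 >>> 3)) 0xb2) 0xFF
  let b3 := PySem.Int.band ((PySem.Int.bor (b2 >>> 4) (b2 <<< 4)) * 0x03 - 0x2f) 0xFF
  let e := PySem.Int.band (PySem.Int.bxor (PySem.Int.bor (b3 >>> 7) (b3 * 0x02)) 0xd4) 0xFF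
  let s := (PySem.List.pyRange 0 8 1).foldl
    (fun (s : Int × Int) _ => (PySem.Int.bor (PySem.Int.band s.2 1) (s.1 * 2), s.2 >>> 1))
    (0, e)
  PySem.Int.band s.1 0xFF

-- ===== PORT B =====
-- the precomputed substitution table from Source B, verbatim
def pvTable : List Int := [
  57, 178, 62, 181, 235, 97, 61, 55, 104, 99, 239, 228, 186, 48, 60, 54,
  233, 50, 190, 53, 107, 225, 237, 231, 184, 179, 63, 100, 106, 176, 188, 182,
  105, 226, 110, 229, 187, 49, 109, 103, 56, 51, 191, 180, 234, 96, 108, 102,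
  185, 98, 238, 101, 59, 177, 189, 183, 232, 227, 111, 52, 58, 224, 236, 230,
  149, 154, 145, 157, 199, 73, 147, 31, 196, 75, 192, 204, 150, 24, 146, 30,
  69, 26, 17, 29, 71, 201, 67, 207, 20, 155, 16, 76, 22, 152, 18, 158,
  197, 202, 193, 205, 151, 25, 195, 79, 148, 27, 144, 156, 198, 72, 194, 78,
  21, 74, 65, 77, 23, 153, 19, 159, 68, 203, 64, 28, 70, 200, 66, 206,
  169, 35, 175, 37, 116, 120, 44, 39, 246, 122, 242, 124, 170, 161, 173, 126,
  119, 163, 47, 165, 244, 248, 240, 255, 40, 162, 46, 252, 42, 33, 45, 166,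
  247, 123, 243, 125, 171, 32, 112, 127, 168, 34, 174, 36, 245, 249, 241, 38,
  41, 251, 115, 253, 43, 160, 172, 167, 118, 250, 114, 164, 117, 121, 113, 254,
  130, 12, 4, 8, 217, 14, 134, 10, 91, 209, 221, 215, 128, 143, 7, 84,
  90, 140, 132, 136, 89, 210, 94, 213, 131, 13, 93, 87, 0, 15, 135, 11,
  218, 80, 92, 86, 129, 82, 222, 85, 3, 141, 133, 137, 216, 211, 95, 139,
  2, 208, 220, 214, 1, 142, 6, 138, 219, 81, 5, 9, 88, 83, 223, 212
]

def calculate_alt (param_1 : Int) : Int :=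
  (PySem.List.pyGet? pvTable (PySem.Int.band param_1 0xFF)).getD 0

-- ===== PRECONDITION & SPEC =====
def Spec_calculate (param_1 : Int) (out : Int) : Prop := out = calculate_alt param_1
instance (param_1 : Int) (out : Int) : Decidable (Spec_calculate param_1 out) := by unfold Spec_calculate; infer_instance

-- ===== CLAIM (what is proved, stated in full; the proofs are below) =====
def Claim_equal_calculate : Prop := ∀ (param_1 : Int), Dom_calculate param_1 → Spec_calculate param_1 (calculate param_1)

-- ===== LEMMAS AND PROOFS =====
lemma band255_range (a : Int) :
    0 ≤ PySem.Int.band a 255 ∧ PySem.Int.band a 255 < 256 := by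
  unfold PySem.Int.band
  split_ifs with h1 h2 h2
  · have := Nat.and_le_right (n := a.toNat) (m := (255 : Int).toNat)
    constructor <;> [positivity; omega]
  · omega
  · have hb : ((255:Int).toNat &&& (-a - 1).toNat) ≤ (255:Int).toNat :=
      Nat.and_le_left
    constructor <;> [positivity; omega]
  · omega

lemma band255_self (x : Int) (h0 : 0 ≤ x) (h1 : x < 256) :
    PySem.Int.band x 255 = x := by
  unfold PySem.Int.band
  split_ifs with h
  · have h2 : x.toNat &&& 255 = x.toNat % 256 := by
      have := Nat.and_two_pow_sub_one_eq_mod x.toNat 8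
      norm_num at this
      exact this
    have h3 : (255 : Int).toNat = 255 := rfl
    rw [h3, h2]
    omega
  · omega

set_option maxRecDepth 16384 in
lemma core_eq (n : Nat) (h : n < 256) :
    calculate (n : Int) = calculate_alt (n : Int) := by
  revert h; revert n; decide

-- ===== VERDICT (by name: the statement is the Claim_ definition above) =====
theorem calculate_spec : Claim_equal_calculate := by
  intro p _
  unfold Spec_calculate
  obtain ⟨h0, h1⟩ := band255_range p
  have hb : PySem.Int.band (PySem.Int.band p 255) 255 = PySem.Int.band p 255 :=
    band255_self _ h0 h1
  have hA : calculate (PySem.Int.band p 255) = calculate p := by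
    simp only [calculate, hb]
  have hB : calculate_alt (PySem.Int.band p 255) = calculate_alt p := by
    simp only [calculate_alt, hb]
  rw [← hA, ← hB]
  have hx : PySem.Int.band p 255 = (((PySem.Int.band p 255).toNat : Nat) : Int) := by omega
  rw [hx]
  exact core_eq _ (by omega)
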